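-- pv_equiv track=rewrite | github.com/wilmurillo-ai/Design-Assistant | .skills/openclaw-skills/skills/vxcent/virse/scripts/graph_analysis.py | bfs_chain
-- ===== SOURCE A (Python) =====
-- from collections import deque
--
-- def bfs_chain(start, out_edges, nodes):
--     """BFS from start node, return ordered chain of (id, depth)."""
--     visited = set()
--     queue = deque([(start, 0)])
--     chain = []
--
--     while queue:
--         nid, depth = queue.popleft()
--         if nid in visited:
--             continue
--         visited.add(nid)
--         chain.append((nid, depth))
--         for target in out_edges.get(nid, []):
--             if target not in visited and target in nodes:
--                 queue.append((target, depth + 1))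
--
--     return chain
-- ===== SOURCE B (Python) =====
-- def bfs_chain(start, out_edges, nodes):
--     """BFS from start node, return ordered chain of (id, depth).
--
--     Level-synchronous: the depth is an outer loop counter and each level's
--     frontier is processed as a batch, instead of storing depths in a FIFO queue.
--     """
--     visited = set()
--     chain = []
--     frontier = [start]
--     depth = 0
--     while frontier:
--         next_frontier = []
--         for nid in frontier:
--             if nid in visited:
--                 continue
--             visited.add(nid)
--             chain.append((nid, depth))
--             for target in out_edges.get(nid, []):
--                 if target not in visited and target in nodes:
--                     next_frontier.append(target)
--         frontier = next_frontier
--         depth += 1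
--     return chain
-- ===== Notes on version B (the rewrite author's own statement) =====
-- stated objective: alternative
-- what changed: Replaces the single FIFO queue of (node, depth) pairs by level-synchronous BFS: an outer loop carries the depth as an integer counter and an inner loop expands the whole current frontier into the next one, so depths are never stored in the worklist.
import Mathlib
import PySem

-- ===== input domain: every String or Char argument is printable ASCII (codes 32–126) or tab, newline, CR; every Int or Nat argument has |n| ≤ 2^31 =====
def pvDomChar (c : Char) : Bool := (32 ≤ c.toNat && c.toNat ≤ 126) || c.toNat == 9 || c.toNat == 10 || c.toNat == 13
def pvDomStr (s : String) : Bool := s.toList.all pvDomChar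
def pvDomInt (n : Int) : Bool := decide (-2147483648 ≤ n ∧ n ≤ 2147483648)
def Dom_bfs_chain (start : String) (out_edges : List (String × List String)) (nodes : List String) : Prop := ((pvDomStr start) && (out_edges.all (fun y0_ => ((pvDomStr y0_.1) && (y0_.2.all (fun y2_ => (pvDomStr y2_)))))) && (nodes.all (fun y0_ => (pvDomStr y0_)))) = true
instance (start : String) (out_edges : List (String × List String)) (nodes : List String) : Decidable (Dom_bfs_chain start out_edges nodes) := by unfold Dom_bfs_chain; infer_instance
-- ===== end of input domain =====

-- B replaces A's FIFO queue of (node, depth) pairs by level-synchronous BFS with the depth as an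
-- outer loop counter (objective: alternative decomposition, same cost).

-- ===== PORT A =====
-- total length of all adjacency lists (used only to size the fuel guards below)
def pvE (out_edges : List (String × List String)) : Nat :=
  (out_edges.map (fun p => p.2.length)).sum

-- fuel guard making both loops total; it strictly exceeds the number of queue pops (resp. BFS
-- levels) either Python loop can perform, so the guard is never hit (proved via pvBound below)
def pvFuel (out_edges : List (String × List String)) (nodes : List String) : Nat :=
  (pvE out_edges + 1) * (nodes.length + 1) + 1

-- 'out_edges.get(nid, [])' filtered by 'target not in visited and target in nodes'
-- (this test appears verbatim in A's and B's Python)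
def pvPushes (out_edges : List (String × List String)) (nodes : List String)
    (visited : PySem.Set String) (nid : String) : List String :=
  (PySem.Dict.getD (PySem.Dict.mk out_edges) nid []).filter
    (fun t => decide (t ∉ visited ∧ t ∈ nodes))

-- A's 'while queue:' loop; one unit of fuel per pop
def bfsLoopA (out_edges : List (String × List String)) (nodes : List String) :
    Nat → PySem.Set String → List (String × Int) → List (String × Int) → List (String × Int)
  | _, _, [], chain => chain
  | 0, _, _, chain => chain
  | fuel + 1, visited, (nid, depth) :: rest, chain =>
    if nid ∈ visited then
      bfsLoopA out_edges nodes fuel visited rest chain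
    else
      let v' := PySem.Set.add visited nid
      bfsLoopA out_edges nodes fuel v'
        (rest ++ (pvPushes out_edges nodes v' nid).map (fun t => (t, depth + 1)))
        (chain ++ [(nid, depth)])

def bfs_chain (start : String) (out_edges : List (String × List String)) (nodes : List String) : List (String × Int) :=
  bfsLoopA out_edges nodes (pvFuel out_edges nodes) PySem.Set.empty [(start, 0)] []

-- ===== PORT B =====
-- B's inner 'for nid in frontier:' loop, accumulating the next frontier
def bfsInnerB (out_edges : List (String × List String)) (nodes : List String) (depth : Int) :
    List String → PySem.Set String → List (String × Int) → List String →
    PySem.Set String × List (String × Int) × List String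
  | [], visited, chain, next => (visited, chain, next)
  | nid :: rest, visited, chain, next =>
    if nid ∈ visited then
      bfsInnerB out_edges nodes depth rest visited chain next
    else
      let v' := PySem.Set.add visited nid
      bfsInnerB out_edges nodes depth rest v' (chain ++ [(nid, depth)])
        (next ++ pvPushes out_edges nodes v' nid)

-- B's outer 'while frontier:' loop; one unit of fuel per level
def bfsLoopB (out_edges : List (String × List String)) (nodes : List String) :
    Nat → PySem.Set String → List String → Int → List (String × Int) → List (String × Int)
  | _, _, [], _, chain => chain
  | 0, _, _, _, chain => chain
  | fuel + 1, visited, frontier, depth, chain =>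
    bfsLoopB out_edges nodes fuel
      (bfsInnerB out_edges nodes depth frontier visited chain []).1
      (bfsInnerB out_edges nodes depth frontier visited chain []).2.2 (depth + 1)
      (bfsInnerB out_edges nodes depth frontier visited chain []).2.1

def bfs_chain_alt (start : String) (out_edges : List (String × List String)) (nodes : List String) : List (String × Int) :=
  bfsLoopB out_edges nodes (pvFuel out_edges nodes) PySem.Set.empty [start] 0 []

-- ===== PRECONDITION & SPEC =====
def Spec_bfs_chain (start : String) (out_edges : List (String × List String)) (nodes : List String) (out : List (String × Int)) : Prop := out = bfs_chain_alt start out_edges nodes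
instance (start : String) (out_edges : List (String × List String)) (nodes : List String) (out : List (String × Int)) : Decidable (Spec_bfs_chain start out_edges nodes out) := by unfold Spec_bfs_chain; infer_instance

-- ===== CLAIM (what is proved, stated in full; the proofs are below) =====
def Claim_equal_bfs_chain : Prop := ∀ (start : String) (out_edges : List (String × List String)) (nodes : List String), Dom_bfs_chain start out_edges nodes → Spec_bfs_chain start out_edges nodes (bfs_chain start out_edges nodes)

-- ===== LEMMAS AND PROOFS =====

-- number of elements of xs (as a finite set) not yet visited
def pvUnvis (v : PySem.Set String) (xs : List String) : Nat :=
  (xs.toFinset.filter (fun x => x ∉ v)).card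

-- strict upper bound on the work left: (pvE+1) per unvisited candidate plus one per frontier entry
def pvBound (out_edges : List (String × List String)) (nodes : List String)
    (v : PySem.Set String) (frontier : List String) : Nat :=
  (pvE out_edges + 1) * pvUnvis v (nodes ++ frontier) + frontier.length

theorem pvUnvis_mono (v v' : PySem.Set String) (xs ys : List String)
    (hx : ∀ x ∈ xs, x ∈ ys) (hv : ∀ x ∈ v, x ∈ v') :
    pvUnvis v' xs ≤ pvUnvis v ys := by
  apply Finset.card_le_card
  intro x hx'
  simp only [Finset.mem_filter, List.mem_toFinset] at *
  exact ⟨hx x hx'.1, fun h => hx'.2 (hv x h)⟩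

theorem pvUnvis_strict (v : PySem.Set String) (a : String) (xs ys : List String)
    (ha : a ∈ ys) (hav : a ∉ v) (hx : ∀ x ∈ xs, x ∈ ys) :
    pvUnvis (PySem.Set.add v a) xs < pvUnvis v ys := by
  apply Finset.card_lt_card
  constructor
  · intro x hx'
    simp only [Finset.mem_filter, List.mem_toFinset, PySem.Set.mem_add] at *
    exact ⟨hx x hx'.1, fun h => hx'.2 (Or.inl h)⟩
  · intro hsub
    have := hsub (by simp [Finset.mem_filter, List.mem_toFinset, ha, hav] : a ∈ ys.toFinset.filter (fun x => x ∉ v))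
    simp [Finset.mem_filter, PySem.Set.mem_add] at this

theorem pvUnvis_le_length (v : PySem.Set String) (xs : List String) :
    pvUnvis v xs ≤ xs.length :=
  le_trans (Finset.card_le_card (Finset.filter_subset _ _))
    (le_trans xs.toFinset_card_le (le_refl _))

theorem pvGetD_len_le (out_edges : List (String × List String)) (nid : String) :
    (PySem.Dict.getD (PySem.Dict.mk out_edges) nid []).length ≤ pvE out_edges := by
  induction out_edges with
  | nil => simp [PySem.Dict.getD, PySem.Dict.get?, pvE]
  | cons p rest ih =>
    obtain ⟨k, vl⟩ := p
    have hstep : PySem.Dict.getD (PySem.Dict.mk ((k, vl) :: rest)) nid [] =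
        if k == nid then vl else PySem.Dict.getD (PySem.Dict.mk rest) nid [] := by
      simp only [PySem.Dict.getD, PySem.Dict.get?_mk_cons]
      by_cases h : k == nid <;> simp [h]
    rw [hstep]
    by_cases h : k == nid
    · simp [h, pvE]
    · simp only [h]
      calc (PySem.Dict.getD (PySem.Dict.mk rest) nid []).length ≤ pvE rest := ih
        _ ≤ pvE ((k, vl) :: rest) := by simp [pvE]

theorem pvPushes_len_le (out_edges : List (String × List String)) (nodes : List String)
    (visited : PySem.Set String) (nid : String) :
    (pvPushes out_edges nodes visited nid).length ≤ pvE out_edges :=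
  le_trans (List.length_filter_le _ _) (pvGetD_len_le out_edges nid)

theorem pvPushes_sub (out_edges : List (String × List String)) (nodes : List String)
    (visited : PySem.Set String) (nid : String) :
    ∀ t ∈ pvPushes out_edges nodes visited nid, t ∈ nodes := by
  intro t ht
  have := List.of_mem_filter ht
  simp at this
  exact this.2

-- one inner pass strictly shrinks the bound: it accounts each new visit (pvE+1 ≥ 1 + its pushes)
theorem bfsInnerB_bound (out_edges : List (String × List String)) (nodes : List String)
    (depth : Int) :
    ∀ (frontier : List String) (visited : PySem.Set String)
      (chain : List (String × Int)) (next : List String),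
      (∀ x ∈ next, x ∈ nodes) →
      (pvE out_edges + 1) *
          pvUnvis (bfsInnerB out_edges nodes depth frontier visited chain next).1
            (nodes ++ (bfsInnerB out_edges nodes depth frontier visited chain next).2.2) +
          (bfsInnerB out_edges nodes depth frontier visited chain next).2.2.length ≤
        (pvE out_edges + 1) * pvUnvis visited (nodes ++ frontier) + next.length := by
  intro frontier
  induction frontier with
  | nil =>
    intro visited chain next hnext
    simp only [bfsInnerB]
    have hmono := pvUnvis_mono visited visited (nodes ++ next) (nodes ++ [])
      (by intro x hx; simp at hx ⊢; rcases hx with h | h; exacts [h, hnext x h])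
      (fun x h => h)
    have h2 := Nat.mul_le_mul_left (pvE out_edges + 1) hmono
    omega
  | cons nid rest ih =>
    intro visited chain next hnext
    simp only [bfsInnerB]
    by_cases h : nid ∈ visited
    · simp only [h, if_true]
      have hmono := pvUnvis_mono visited visited (nodes ++ rest) (nodes ++ nid :: rest)
        (by intro x hx; simp at hx ⊢; tauto) (fun x hx => hx)
      have h2 := Nat.mul_le_mul_left (pvE out_edges + 1) hmono
      calc _ ≤ (pvE out_edges + 1) * pvUnvis visited (nodes ++ rest) + next.length :=
            ih visited chain next hnext
        _ ≤ _ := by omega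
    · simp only [h, if_false]
      have hnext' : ∀ x ∈ next ++ pvPushes out_edges nodes (PySem.Set.add visited nid) nid,
          x ∈ nodes := by
        intro x hx
        rcases List.mem_append.mp hx with h' | h'
        · exact hnext x h'
        · exact pvPushes_sub _ _ _ _ x h'
      have hstrict := pvUnvis_strict visited nid (nodes ++ rest) (nodes ++ nid :: rest)
        (by simp) h (by intro x hx; simp at hx ⊢; tauto)
      have hlen := pvPushes_len_le out_edges nodes (PySem.Set.add visited nid) nid
      calc _ ≤ (pvE out_edges + 1) * pvUnvis (PySem.Set.add visited nid) (nodes ++ rest) +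
              (next ++ pvPushes out_edges nodes (PySem.Set.add visited nid) nid).length :=
            ih (PySem.Set.add visited nid) (chain ++ [(nid, depth)]) _ hnext'
        _ ≤ _ := by
            simp only [List.length_append]
            have h1 : (pvE out_edges + 1) *
                (pvUnvis (PySem.Set.add visited nid) (nodes ++ rest) + 1) ≤
                (pvE out_edges + 1) * pvUnvis visited (nodes ++ nid :: rest) :=
              Nat.mul_le_mul_left _ hstrict
            have h2 : (pvE out_edges + 1) *
                (pvUnvis (PySem.Set.add visited nid) (nodes ++ rest) + 1) =
                (pvE out_edges + 1) * pvUnvis (PySem.Set.add visited nid) (nodes ++ rest) +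
                  (pvE out_edges + 1) := by ring
            omega

-- running A's queue loop through one frontier level (one pop per entry = frontier.length fuel)
-- equals B's inner fold followed by A's loop on the next level's queue
theorem level_step (out_edges : List (String × List String)) (nodes : List String) (d : Int) :
    ∀ (frontier : List String) (fuel : Nat) (visited : PySem.Set String)
      (chain : List (String × Int)) (next : List String),
      bfsLoopA out_edges nodes (fuel + frontier.length) visited
          (frontier.map (fun x => (x, d)) ++ next.map (fun x => (x, d + 1))) chain =
        bfsLoopA out_edges nodes fuel
          (bfsInnerB out_edges nodes d frontier visited chain next).1
          ((bfsInnerB out_edges nodes d frontier visited chain next).2.2.map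
            (fun x => (x, d + 1)))
          (bfsInnerB out_edges nodes d frontier visited chain next).2.1 := by
  intro frontier
  induction frontier with
  | nil => intro fuel visited chain next; simp [bfsInnerB]
  | cons nid rest ih =>
    intro fuel visited chain next
    have hfa : fuel + (nid :: rest).length = (fuel + rest.length) + 1 := by
      simp [List.length_cons]; omega
    rw [hfa, List.map_cons, List.cons_append, bfsLoopA]
    simp only [bfsInnerB]
    by_cases h : nid ∈ visited
    · simp only [h, if_true]
      exact ih (fuel) visited chain next
    · simp only [h, if_false]
      have harr : (rest.map (fun x => (x, d)) ++ next.map (fun x => (x, d + 1))) ++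
          (pvPushes out_edges nodes (PySem.Set.add visited nid) nid).map
            (fun t => (t, d + 1)) =
          rest.map (fun x => (x, d)) ++
            (next ++ pvPushes out_edges nodes (PySem.Set.add visited nid) nid).map
              (fun x => (x, d + 1)) := by
        rw [List.map_append, List.append_assoc]
      rw [harr]
      exact ih (fuel) (PySem.Set.add visited nid) (chain ++ [(nid, d)]) _

-- with sufficient fuel on both sides, B's level loop equals A's queue loop on the mapped frontier
theorem loopB_eq_loopA (out_edges : List (String × List String)) (nodes : List String) :
    ∀ (fuelB : Nat) (visited : PySem.Set String) (frontier : List String) (d : Int)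
      (chain : List (String × Int)) (fuelA : Nat),
      pvBound out_edges nodes visited frontier ≤ fuelB →
      pvBound out_edges nodes visited frontier ≤ fuelA →
      bfsLoopB out_edges nodes fuelB visited frontier d chain =
        bfsLoopA out_edges nodes fuelA visited (frontier.map (fun x => (x, d))) chain := by
  intro fuelB
  induction fuelB with
  | zero =>
    intro visited frontier d chain fuelA hB _
    cases frontier with
    | nil => cases fuelA <;> rfl
    | cons f fs =>
      exfalso
      simp [pvBound] at hB
  | succ fuelB ih =>
    intro visited frontier d chain fuelA hB hA
    cases frontier with
    | nil => cases fuelA <;> rfl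
    | cons f fs =>
      have hlen : (f :: fs).length ≤ fuelA := by
        have := hA
        simp only [pvBound] at this
        omega
      have hfa : fuelA = (fuelA - (f :: fs).length) + (f :: fs).length := by omega
      have hstep : bfsLoopB out_edges nodes (fuelB + 1) visited (f :: fs) d chain =
          bfsLoopB out_edges nodes fuelB
            (bfsInnerB out_edges nodes d (f :: fs) visited chain []).1
            (bfsInnerB out_edges nodes d (f :: fs) visited chain []).2.2 (d + 1)
            (bfsInnerB out_edges nodes d (f :: fs) visited chain []).2.1 := rfl
      rw [hstep, hfa]
      have hls := level_step out_edges nodes d (f :: fs) (fuelA - (f :: fs).length)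
        visited chain []
      simp only [List.map_nil, List.append_nil] at hls
      rw [hls]
      have hbound := bfsInnerB_bound out_edges nodes d (f :: fs) visited chain []
        (by intro x hx; simp at hx)
      simp only [List.length_nil, Nat.add_zero] at hbound
      unfold pvBound at hB hA
      simp only [List.length_cons] at hB hA
      apply ih
      · unfold pvBound
        omega
      · unfold pvBound
        simp only [List.length_cons]
        omega

theorem pvFuel_sufficient (out_edges : List (String × List String)) (nodes : List String)
    (start : String) :
    pvBound out_edges nodes PySem.Set.empty [start] ≤ pvFuel out_edges nodes := by
  have h1 : pvUnvis PySem.Set.empty (nodes ++ [start]) ≤ nodes.length + 1 :=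
    le_trans (pvUnvis_le_length _ _) (by simp)
  have h2 := Nat.mul_le_mul_left (pvE out_edges + 1) h1
  simp only [pvBound, pvFuel, List.length_cons, List.length_nil]
  omega

-- ===== VERDICT (by name: the statement is the Claim_ definition above) =====
theorem bfs_chain_spec : Claim_equal_bfs_chain := by
  intro start out_edges nodes _
  unfold Spec_bfs_chain bfs_chain bfs_chain_alt
  rw [loopB_eq_loopA out_edges nodes (pvFuel out_edges nodes) PySem.Set.empty [start] 0 []
    (pvFuel out_edges nodes) (pvFuel_sufficient out_edges nodes start)
    (pvFuel_sufficient out_edges nodes start)]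
  simp
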